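-- pv_equiv track=rewrite | github.com/sungheeeHong/PasswordGeneration | CodebookModule.py | Codebook_HorizontalSliding
-- ===== SOURCE A (Python) =====
-- def Codebook_HorizontalSliding(vocab:list):
--     hor = {'hor1' : 'qwertyuiop', 'hor2' : 'asdfghjkl', 'hor3' : 'zxcvbnm'}
--     coded_data = []
--     for token in vocab:
--         coded_temp = ''
--         for a_index in range(len(token)):
--             # out of range 처리
--             if a_index + 1 == len(token):
--                 coded_data.append(coded_temp + token[a_index])
--                 break
--             # 1. 연속된 두 단어가 같은 horizontal line 상에 있는지 확인
--             if (token[a_index] in hor['hor1']) & (token[a_index + 1] in hor['hor1']):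
--                 # startpoint, endpoint에 각각의 인덱스 저장
--                 startpoint = hor['hor1'].index(token[a_index])
--                 endpoint = hor['hor1'].index(token[a_index + 1])
--                 # 예외처리: startpoint, endpoint가 같은 경우
--                 if startpoint == endpoint:
--                     coded_temp += token[a_index]
--                     continue
--                 for i in range(startpoint, endpoint, 1 if endpoint > startpoint else -1):
--                     coded_temp += hor['hor1'][i]
--             elif (token[a_index] in hor['hor2']) & (token[a_index + 1] in hor['hor2']):
--                 # startpoint, endpoint에 각각의 인덱스 저장
--                 startpoint = hor['hor2'].index(token[a_index])
--                 endpoint = hor['hor2'].index(token[a_index + 1])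
--                 # 예외처리: startpoint, endpoint가 같은 경우
--                 if startpoint == endpoint:
--                     coded_temp += token[a_index]
--                     continue
--                 for i in range(startpoint, endpoint, 1 if endpoint > startpoint else -1):
--                     coded_temp += hor['hor2'][i]
--             elif (token[a_index] in hor['hor3']) & (token[a_index + 1] in hor['hor3']):
--                 # startpoint, endpoint에 각각의 인덱스 저장
--                 startpoint = hor['hor3'].index(token[a_index])
--                 endpoint = hor['hor3'].index(token[a_index + 1])
--                 # 예외처리: startpoint, endpoint가 같은 경우
--                 if startpoint == endpoint:
--                     coded_temp += token[a_index]
--                     continue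
--                 for i in range(startpoint, endpoint, 1 if endpoint > startpoint else -1):
--                     coded_temp += hor['hor3'][i]
--             else:
--                 coded_temp += token[a_index]
--     codebook = {vocab[i] : coded_data[i] for i in range(len(vocab))}
--     return codebook
-- ===== SOURCE B (Python) =====
-- def Codebook_HorizontalSliding(vocab: list):
--     rows = ('qwertyuiop', 'asdfghjkl', 'zxcvbnm')
--     pos = {ch: (row, i) for row in rows for i, ch in enumerate(row)}
--     codebook = {}
--     for token in vocab:
--         segs = []
--         for c, d in zip(token, token[1:]):
--             ic, id_ = pos.get(c), pos.get(d)
--             if ic is not None and id_ is not None and ic[0] == id_[0] and ic[1] != id_[1]: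
--                 row, i, j = ic[0], ic[1], id_[1]
--                 segs.append(row[i:j] if i < j else row[j + 1:i + 1][::-1])
--             else:
--                 segs.append(c)
--         codebook[token] = ''.join(segs) + (token[-1] if token else '')
--     return codebook
-- ===== Notes on version B (the rewrite author's own statement) =====
-- stated objective: faster
-- what changed: B precomputes one char->(row,position) dictionary and emits each same-row expansion as a single row slice (reversed for leftward slides), replacing A's triplicated per-row membership tests, .index scans and character-by-character range loops.
-- crash fix: On any vocab containing an empty token A raises IndexError (coded_data is left shorter than vocab, so the final dict comprehension indexes past its end); B returns the codebook with code '' for the empty token. — e.g. on Codebook_HorizontalSliding([""]): A raises IndexError, B returns [("", "")]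
import Mathlib
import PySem

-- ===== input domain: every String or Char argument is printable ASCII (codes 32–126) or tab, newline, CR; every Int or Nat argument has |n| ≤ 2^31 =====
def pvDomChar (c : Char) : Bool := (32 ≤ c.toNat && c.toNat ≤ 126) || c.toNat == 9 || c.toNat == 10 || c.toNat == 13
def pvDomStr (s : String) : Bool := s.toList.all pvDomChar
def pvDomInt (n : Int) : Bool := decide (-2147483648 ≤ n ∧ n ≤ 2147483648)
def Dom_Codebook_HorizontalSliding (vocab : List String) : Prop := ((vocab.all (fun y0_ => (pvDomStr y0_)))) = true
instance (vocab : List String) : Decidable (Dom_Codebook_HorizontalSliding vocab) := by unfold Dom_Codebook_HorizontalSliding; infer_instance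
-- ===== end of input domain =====

-- B replaces A's per-row membership/index searches by one precomputed char→(row,position) map and
-- emits each expansion as a row slice (reversed when sliding left): one lookup per pair instead of
-- repeated row scans (measured faster in a timing run).
-- A mutates nothing; the equivalence is about the returned dict (as an insertion-ordered association list).

-- ===== PORT A =====
def pvHor1 : List Char := ['q','w','e','r','t','y','u','i','o','p']
def pvHor2 : List Char := ['a','s','d','f','g','h','j','k','l']
def pvHor3 : List Char := ['z','x','c','v','b','n','m']

-- the repeated branch body of A: startpoint/endpoint via .index, same-point check, range walk
def pvRowA (row : List Char) (c : Char) : Char → List Char := fun d =>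
  let s : Int := ((PySem.List.index? row c).getD 0 : Nat)
  let e : Int := ((PySem.List.index? row d).getD 0 : Nat)
  if s == e then [c]
  else (PySem.List.pyRange s e (if e > s then 1 else -1)).foldl
        (fun acc i => acc ++ [PySem.List.pyGetD row i ' ']) []

-- the if/elif/elif/else chain applied to token[a_index], token[a_index+1]
def pvStepA (c d : Char) : List Char :=
  if pvHor1.contains c && pvHor1.contains d then pvRowA pvHor1 c d
  else if pvHor2.contains c && pvHor2.contains d then pvRowA pvHor2 c d
  else if pvHor3.contains c && pvHor3.contains d then pvRowA pvHor3 c d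
  else [c]

-- the index loop over one token: coded_temp is the accumulator; at the last index
-- coded_temp + token[-1] is appended (none = the loop appended nothing: empty token)
def pvEncA : List Char → List Char → Option (List Char)
  | [], _ => none
  | [c], acc => some (acc ++ [c])
  | c :: d :: rest, acc => pvEncA (d :: rest) (acc ++ pvStepA c d)

def Codebook_HorizontalSliding (vocab : List String) : List (String × String) :=
  let coded_data : List String := vocab.foldl (fun data tok =>
      match pvEncA tok.toList [] with
      | none => data
      | some cs => data ++ [String.ofList cs]) []
  ((PySem.List.pyRange 0 vocab.length 1).foldl
     (fun d i => d.insert (PySem.List.pyGetD vocab i "") (PySem.List.pyGetD coded_data i ""))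
     (PySem.Dict.empty : PySem.Dict String String)).items

-- ===== PORT B =====
def pvRows : List (List Char) := [pvHor1, pvHor2, pvHor3]

-- pos = {ch: (row, i) for row in rows for i, ch in enumerate(row)}
def pvPos : PySem.Dict Char (List Char × Int) :=
  pvRows.foldl (fun d row =>
    (PySem.List.enumerate row).foldl (fun d p => d.insert p.2 (row, p.1)) d)
    PySem.Dict.empty

def pvStepB (c d : Char) : List Char :=
  match pvPos.get? c, pvPos.get? d with
  | some (r1, i), some (r2, j) =>
    if r1 == r2 && !(i == j) then
      if i < j then PySem.List.slice r1 (some i) (some j)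
      else (PySem.List.slice r1 (some (j + 1)) (some (i + 1))).reverse
    else [c]
  | _, _ => [c]

-- ''.join(segs) + (token[-1] if token else '')
def pvEncB (t : List Char) : List Char :=
  ((t.zip t.tail).map (fun p => pvStepB p.1 p.2)).flatten ++
    (match t.getLast? with | some c => [c] | none => [])

def Codebook_HorizontalSliding_alt (vocab : List String) : List (String × String) :=
  (vocab.foldl (fun d tok => d.insert tok (String.ofList (pvEncB tok.toList)))
    (PySem.Dict.empty : PySem.Dict String String)).items

-- ===== PRECONDITION & SPEC =====
-- Pre_ excludes vocabularies containing an empty token: there A's coded_data is shorter than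
-- vocab and the final comprehension raises IndexError.
def Pre_Codebook_HorizontalSliding (vocab : List String) : Prop := ∀ t ∈ vocab, t ≠ ""
instance (vocab : List String) : Decidable (Pre_Codebook_HorizontalSliding vocab) := by
  unfold Pre_Codebook_HorizontalSliding; infer_instance

def pvWitness_Codebook_HorizontalSliding : List String := ["qep", "hello", "a!b"]

-- On any vocab containing an empty token A raises IndexError; B returns the codebook with code '' for ''.
def Raises_Codebook_HorizontalSliding (vocab : List String) : Prop := "" ∈ vocab
instance (vocab : List String) : Decidable (Raises_Codebook_HorizontalSliding vocab) := by
  unfold Raises_Codebook_HorizontalSliding; infer_instance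
def pvRaiseWitness_Codebook_HorizontalSliding : List String := [""]
def pvRaiseWitnessOut_Codebook_HorizontalSliding : List (String × String) := [("", "")]

def Spec_Codebook_HorizontalSliding (vocab : List String) (out : List (String × String)) : Prop :=
  out = Codebook_HorizontalSliding_alt vocab
instance (vocab : List String) (out : List (String × String)) : Decidable (Spec_Codebook_HorizontalSliding vocab out) := by
  unfold Spec_Codebook_HorizontalSliding; infer_instance

-- ===== CLAIM (what is proved, stated in full; the proofs are below) =====
def Claim_equal_Codebook_HorizontalSliding : Prop := ∀ (vocab : List String),
  Dom_Codebook_HorizontalSliding vocab → Pre_Codebook_HorizontalSliding vocab →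
  Spec_Codebook_HorizontalSliding vocab (Codebook_HorizontalSliding vocab)

def Claim_raises_Codebook_HorizontalSliding : Prop :=
  (∀ (vocab : List String), Dom_Codebook_HorizontalSliding vocab →
      Raises_Codebook_HorizontalSliding vocab → ¬ Pre_Codebook_HorizontalSliding vocab) ∧
  (Dom_Codebook_HorizontalSliding (pvRaiseWitness_Codebook_HorizontalSliding) ∧
   Raises_Codebook_HorizontalSliding (pvRaiseWitness_Codebook_HorizontalSliding) ∧
   Codebook_HorizontalSliding_alt (pvRaiseWitness_Codebook_HorizontalSliding) = pvRaiseWitnessOut_Codebook_HorizontalSliding)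

-- ===== LEMMAS AND PROOFS =====
def pvLetters : List Char := pvHor1 ++ pvHor2 ++ pvHor3

-- one kernel evaluation of the full 26×26 table of letter pairs
set_option maxRecDepth 10000 in
theorem pv_tab_eq : pvLetters.map (fun c => pvLetters.map (fun d => pvStepA c d))
    = pvLetters.map (fun c => pvLetters.map (fun d => pvStepB c d)) := by rfl

theorem pv_step_eq_of_mem (c : Char) (hc : c ∈ pvLetters) (d : Char) (hd : d ∈ pvLetters) :
    pvStepA c d = pvStepB c d :=
  (List.map_inj_left.mp (List.map_inj_left.mp pv_tab_eq c hc)) d hd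

theorem pv_pos_lit : pvPos = PySem.Dict.mk
    [('q', (pvHor1, 0)), ('w', (pvHor1, 1)), ('e', (pvHor1, 2)), ('r', (pvHor1, 3)),
     ('t', (pvHor1, 4)), ('y', (pvHor1, 5)), ('u', (pvHor1, 6)), ('i', (pvHor1, 7)),
     ('o', (pvHor1, 8)), ('p', (pvHor1, 9)),
     ('a', (pvHor2, 0)), ('s', (pvHor2, 1)), ('d', (pvHor2, 2)), ('f', (pvHor2, 3)),
     ('g', (pvHor2, 4)), ('h', (pvHor2, 5)), ('j', (pvHor2, 6)), ('k', (pvHor2, 7)),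
     ('l', (pvHor2, 8)),
     ('z', (pvHor3, 0)), ('x', (pvHor3, 1)), ('c', (pvHor3, 2)), ('v', (pvHor3, 3)),
     ('b', (pvHor3, 4)), ('n', (pvHor3, 5)), ('m', (pvHor3, 6))] := by
  decide

theorem pv_not_letter (c : Char) (hc : c ∉ pvLetters) :
    c ∉ pvHor1 ∧ c ∉ pvHor2 ∧ c ∉ pvHor3 := by
  refine ⟨fun h => hc ?_, fun h => hc ?_, fun h => hc ?_⟩ <;>
    simp [pvLetters, List.mem_append, h]

theorem pv_get_none (c : Char) (hc : c ∉ pvLetters) : pvPos.get? c = none := by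
  simp only [pvLetters, pvHor1, pvHor2, pvHor3, List.cons_append, List.nil_append,
    List.mem_cons, List.not_mem_nil, or_false, not_or] at hc
  obtain ⟨h1,h2,h3,h4,h5,h6,h7,h8,h9,h10,h11,h12,h13,h14,h15,h16,h17,h18,h19,h20,h21,h22,h23,h24,h25,h26⟩ := hc
  rw [pv_pos_lit]
  simp only [PySem.Dict.get?_mk_cons, beq_iff_eq]
  simp [PySem.Dict.get?, Ne.symm h1, Ne.symm h2, Ne.symm h3, Ne.symm h4, Ne.symm h5, Ne.symm h6, Ne.symm h7,
    Ne.symm h8, Ne.symm h9, Ne.symm h10, Ne.symm h11, Ne.symm h12, Ne.symm h13, Ne.symm h14,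
    Ne.symm h15, Ne.symm h16, Ne.symm h17, Ne.symm h18, Ne.symm h19, Ne.symm h20, Ne.symm h21,
    Ne.symm h22, Ne.symm h23, Ne.symm h24, Ne.symm h25, Ne.symm h26]

theorem pv_stepB_default_left (c d : Char) (h : pvPos.get? c = none) : pvStepB c d = [c] := by
  unfold pvStepB
  rw [h]

theorem pv_stepB_default_right (c d : Char) (h : pvPos.get? d = none) : pvStepB c d = [c] := by
  unfold pvStepB
  rw [h]
  rcases pvPos.get? c with _ | ⟨r1, i⟩ <;> rfl

theorem pv_step_eq (c d : Char) : pvStepA c d = pvStepB c d := by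
  by_cases hc : c ∈ pvLetters
  · by_cases hd : d ∈ pvLetters
    · exact pv_step_eq_of_mem c hc d hd
    · obtain ⟨n1, n2, n3⟩ := pv_not_letter d hd
      rw [pv_stepB_default_right c d (pv_get_none d hd)]
      simp [pvStepA, n1, n2, n3]
  · obtain ⟨n1, n2, n3⟩ := pv_not_letter c hc
    rw [pv_stepB_default_left c d (pv_get_none c hc)]
    simp [pvStepA, n1, n2, n3]

theorem pv_enc_eq (t : List Char) : ∀ acc, t ≠ [] → pvEncA t acc = some (acc ++ pvEncB t) := by
  induction t with
  | nil => intro acc h; exact absurd rfl h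
  | cons c ts ih =>
    intro acc _
    cases ts with
    | nil => simp [pvEncA, pvEncB]
    | cons d rest =>
      rw [pvEncA, ih (acc ++ pvStepA c d) (by simp)]
      simp [pvEncB, pv_step_eq, List.append_assoc]

theorem pv_coded_data (vocab : List String) (hp : ∀ t ∈ vocab, t ≠ "") :
    vocab.foldl (fun data tok =>
      match pvEncA tok.toList [] with
      | none => data
      | some cs => data ++ [String.ofList cs]) []
    = vocab.map (fun tok => String.ofList (pvEncB tok.toList)) := by
  rw [PySem.List.foldl_congr_mem
    (g := fun data tok => data ++ [String.ofList (pvEncB tok.toList)])]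
  · exact PySem.List.foldl_append_singleton_eq_map _ _ _
  · intro acc tok hmem
    have ht : tok.toList ≠ [] := by
      intro h0
      apply hp tok hmem
      have h1 := congrArg String.ofList h0
      simpa using h1
    rw [pv_enc_eq tok.toList [] ht]
    simp

-- ===== VERDICT (by name: the statement is the Claim_ definition above) =====
theorem Codebook_HorizontalSliding_spec : Claim_equal_Codebook_HorizontalSliding := by
  intro vocab _ hp
  unfold Spec_Codebook_HorizontalSliding Codebook_HorizontalSliding Codebook_HorizontalSliding_alt
  rw [pv_coded_data vocab hp]
  have hbody : ∀ (d : PySem.Dict String String) (i : Int),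
      d.insert (PySem.List.pyGetD vocab i "")
        (PySem.List.pyGetD (vocab.map (fun tok => String.ofList (pvEncB tok.toList))) i "")
      = d.insert (PySem.List.pyGetD vocab i "")
        (String.ofList (pvEncB (PySem.List.pyGetD vocab i "").toList)) := by
    intro d i
    rw [show ("" : String) = String.ofList (pvEncB "".toList) from rfl]
    rw [PySem.List.pyGetD_map]
    rfl
  have h1 : (PySem.List.pyRange 0 (vocab.length : Int) 1).foldl
        (fun (d : PySem.Dict String String) (i : Int) =>
          d.insert (PySem.List.pyGetD vocab i "")
            (PySem.List.pyGetD (vocab.map (fun tok => String.ofList (pvEncB tok.toList))) i ""))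
        PySem.Dict.empty
      = (PySem.List.pyRange 0 (vocab.length : Int) 1).foldl
        (fun (d : PySem.Dict String String) (i : Int) =>
          d.insert (PySem.List.pyGetD vocab i "")
            (String.ofList (pvEncB (PySem.List.pyGetD vocab i "").toList)))
        PySem.Dict.empty :=
    PySem.List.foldl_congr_mem _ _ _ _ (fun d i _ => hbody d i)
  have h2 : (PySem.List.pyRange 0 (vocab.length : Int) 1).foldl
        (fun (d : PySem.Dict String String) (i : Int) =>
          d.insert (PySem.List.pyGetD vocab i "")
            (String.ofList (pvEncB (PySem.List.pyGetD vocab i "").toList)))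
        PySem.Dict.empty
      = vocab.foldl (fun (d : PySem.Dict String String) tok =>
          d.insert tok (String.ofList (pvEncB tok.toList))) PySem.Dict.empty := by
    have h3 := PySem.List.foldl_pyRange_zero_pyGetD (xs := vocab) (d := "")
      (f := fun (d : PySem.Dict String String) tok =>
        d.insert tok (String.ofList (pvEncB tok.toList)))
      (init := (PySem.Dict.empty : PySem.Dict String String))
    simpa using h3
  exact congrArg PySem.Dict.items (h1.trans h2)

@[simp] theorem Codebook_HorizontalSliding_raises : Claim_raises_Codebook_HorizontalSliding := by
  unfold Claim_raises_Codebook_HorizontalSliding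
  exact ⟨fun v _ hr hp => hp _ hr rfl, by decide⟩
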